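-- pv_equiv track=rewrite | github.com/Will1608/wordle-bot-information-theory | wordle_game.py | __case_letter_occurs_less_in_guess_than_answer
-- ===== SOURCE A (Python) =====
-- def __case_letter_occurs_less_in_guess_than_answer(clue_list, guess_correct_letter_position, correct_answer_correct_letter_position):
--     updated_clue_list = clue_list
--
--     markings_to_place = len(guess_correct_letter_position)
--     correct_position_set = set(guess_correct_letter_position).intersection(set(correct_answer_correct_letter_position))
--
--     if(correct_position_set):
--         for position in correct_position_set:
--             markings_to_place -= 1
--             updated_clue_list[position] = "O"
--
--     for position in guess_correct_letter_position:
--         if not(position in correct_position_set) and markings_to_place > 0: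
--             markings_to_place -= 1
--             updated_clue_list[position] = "_"
--     return updated_clue_list
-- ===== SOURCE B (Python) =====
-- def __case_letter_occurs_less_in_guess_than_answer(clue_list, guess_correct_letter_position, correct_answer_correct_letter_position):
--     answer_set = set(correct_answer_correct_letter_position)
--     for position in guess_correct_letter_position:
--         clue_list[position] = "O" if position in answer_set else "_"
--     return clue_list
-- ===== Notes on version B (the rewrite author's own statement) =====
-- stated objective: simpler
-- what changed: B replaces A's intersection-set construction plus two separate marking loops with a dead markings_to_place counter by one pass over the guess positions that writes 'O' or '_' by a single membership test in set(correct_answer_correct_letter_position), using the invariant that A's counter cap never triggers.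
-- outside the precondition, e.g. on __case_letter_occurs_less_in_guess_than_answer(['a', 'b'], [-2, 0], [0]): A returns ['_', 'b'], B returns ['O', 'b']
import Mathlib
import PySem

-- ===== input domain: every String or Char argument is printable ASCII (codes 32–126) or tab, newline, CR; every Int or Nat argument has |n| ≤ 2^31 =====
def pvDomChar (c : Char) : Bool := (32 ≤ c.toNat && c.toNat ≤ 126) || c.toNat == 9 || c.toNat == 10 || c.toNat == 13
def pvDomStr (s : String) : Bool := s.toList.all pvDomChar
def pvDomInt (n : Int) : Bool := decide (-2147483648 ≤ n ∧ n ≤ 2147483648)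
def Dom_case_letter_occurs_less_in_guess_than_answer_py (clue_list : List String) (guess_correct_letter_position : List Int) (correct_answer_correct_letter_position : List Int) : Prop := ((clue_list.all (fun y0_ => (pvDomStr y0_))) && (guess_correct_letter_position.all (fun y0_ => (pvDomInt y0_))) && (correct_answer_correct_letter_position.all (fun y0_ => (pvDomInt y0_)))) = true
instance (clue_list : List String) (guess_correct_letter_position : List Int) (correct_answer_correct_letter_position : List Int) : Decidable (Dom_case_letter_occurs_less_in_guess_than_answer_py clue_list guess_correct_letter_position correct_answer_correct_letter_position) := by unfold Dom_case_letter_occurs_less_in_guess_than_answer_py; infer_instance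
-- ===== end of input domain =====

-- B replaces A's intersection set + two marking loops (with a counter whose cap never fires) by one
-- pass writing 'O'/'_' from a single answer-set membership test (objective: simpler). Both A and B
-- mutate clue_list in place in Python; the equivalence proved here is about the return value.


-- ===== PORT A =====
def case_letter_occurs_less_in_guess_than_answer_py (clue_list : List String) (guess_correct_letter_position : List Int) (correct_answer_correct_letter_position : List Int) : List String :=
  let updated_clue_list := clue_list
  let markings_to_place : Int := guess_correct_letter_position.length
  let correct_position_set : PySem.Set Int :=
    PySem.Set.inter (PySem.Set.ofList guess_correct_letter_position)
      (PySem.Set.ofList correct_answer_correct_letter_position)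
  let st1 :=
    if correct_position_set ≠ [] then
      correct_position_set.foldl
        (fun st position => (st.1 - 1, PySem.List.pySetD st.2 position "O"))
        (markings_to_place, updated_clue_list)
    else (markings_to_place, updated_clue_list)
  let st2 :=
    guess_correct_letter_position.foldl
      (fun st position =>
        if ¬ (PySem.Set.contains correct_position_set position) = true ∧ st.1 > 0 then
          (st.1 - 1, PySem.List.pySetD st.2 position "_")
        else st)
      st1
  st2.2

-- ===== PORT B =====
def case_letter_occurs_less_in_guess_than_answer_py_alt (clue_list : List String) (guess_correct_letter_position : List Int) (correct_answer_correct_letter_position : List Int) : List String :=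
  let answer_set : PySem.Set Int := PySem.Set.ofList correct_answer_correct_letter_position
  guess_correct_letter_position.foldl
    (fun cl position =>
      PySem.List.pySetD cl position (if PySem.Set.contains answer_set position then "O" else "_"))
    clue_list

-- ===== PRECONDITION & SPEC =====
-- pvSlot n p is the actual list cell Python's clue_list[p] assignment touches (negative p counts from the end).
def pvSlot (n : Nat) (p : Int) : Nat := if 0 ≤ p then p.toNat else n - (-p).toNat

-- Pre_ excludes (a) guess positions out of range, where A raises IndexError, and (b) guesses holding two
-- aliased indices (p and p - len pointing at the same cell) whose answer-membership marks differ: there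
-- the final mark of that cell is an accident of A's write order (all 'O's first) vs B's guess order,
-- an unspecified corner neither value of which anyone would specify.
def Pre_case_letter_occurs_less_in_guess_than_answer_py (clue_list : List String) (guess_correct_letter_position : List Int) (correct_answer_correct_letter_position : List Int) : Prop :=
  (∀ p ∈ guess_correct_letter_position, PySem.Raise.InRange clue_list.length p) ∧
  (∀ p ∈ guess_correct_letter_position, ∀ q ∈ guess_correct_letter_position,
     pvSlot clue_list.length p = pvSlot clue_list.length q →
       (p ∈ correct_answer_correct_letter_position ↔ q ∈ correct_answer_correct_letter_position))
instance (clue_list : List String) (guess_correct_letter_position : List Int) (correct_answer_correct_letter_position : List Int) : Decidable (Pre_case_letter_occurs_less_in_guess_than_answer_py clue_list guess_correct_letter_position correct_answer_correct_letter_position) := by unfold Pre_case_letter_occurs_less_in_guess_than_answer_py; infer_instance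

def pvWitness_case_letter_occurs_less_in_guess_than_answer_py : List String × List Int × List Int :=
  (["g", "u", "e"], [0, 2], [2, 4])

def Spec_case_letter_occurs_less_in_guess_than_answer_py (clue_list : List String) (guess_correct_letter_position : List Int) (correct_answer_correct_letter_position : List Int) (out : List String) : Prop := out = case_letter_occurs_less_in_guess_than_answer_py_alt clue_list guess_correct_letter_position correct_answer_correct_letter_position
instance (clue_list : List String) (guess_correct_letter_position : List Int) (correct_answer_correct_letter_position : List Int) (out : List String) : Decidable (Spec_case_letter_occurs_less_in_guess_than_answer_py clue_list guess_correct_letter_position correct_answer_correct_letter_position out) := by unfold Spec_case_letter_occurs_less_in_guess_than_answer_py; infer_instance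

-- ===== CLAIM (what is proved, stated in full; the proofs are below) =====
def Claim_equal_case_letter_occurs_less_in_guess_than_answer_py : Prop := ∀ (clue_list : List String) (guess_correct_letter_position : List Int) (correct_answer_correct_letter_position : List Int), Dom_case_letter_occurs_less_in_guess_than_answer_py clue_list guess_correct_letter_position correct_answer_correct_letter_position → Pre_case_letter_occurs_less_in_guess_than_answer_py clue_list guess_correct_letter_position correct_answer_correct_letter_position → Spec_case_letter_occurs_less_in_guess_than_answer_py clue_list guess_correct_letter_position correct_answer_correct_letter_position (case_letter_occurs_less_in_guess_than_answer_py clue_list guess_correct_letter_position correct_answer_correct_letter_position)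

-- ===== LEMMAS AND PROOFS =====

lemma pvSlot_lt {n : Nat} {p : Int} (h : PySem.Raise.InRange n p) : pvSlot n p < n := by
  obtain ⟨h1, h2⟩ := h
  unfold pvSlot
  split <;> omega

lemma pySetD_slot {cl : List String} {p : Int} (h : PySem.Raise.InRange cl.length p) (v : String) :
    PySem.List.pySetD cl p v = cl.set (pvSlot cl.length p) v := by
  obtain ⟨h1, h2⟩ := h
  unfold PySem.List.pySetD PySem.List.pySet? PySem.List.pyIdx? pvSlot
  split_ifs <;> simp_all

-- one write step on the list of (index, mark) pairs
def pvWStep (cl : List String) (pv : Int × String) : List String :=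
  PySem.List.pySetD cl pv.1 pv.2

-- pointwise value of a fold of Python index-assignments whose marks agree on aliased slots
lemma pvWFold_getElem? (ws : List (Int × String)) (cl : List String) (n : Nat) (j : Nat)
    (hn : cl.length = n)
    (hr : ∀ pv ∈ ws, PySem.Raise.InRange n pv.1)
    (hc : ∀ pv ∈ ws, ∀ qw ∈ ws, pvSlot n pv.1 = pvSlot n qw.1 → pv.2 = qw.2) :
    (ws.foldl pvWStep cl)[j]? =
      match ws.find? (fun pv => pvSlot n pv.1 == j) with
      | some pv => some pv.2
      | none => cl[j]? := by
  induction ws generalizing cl with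
  | nil => rfl
  | cons pv ws ih =>
    have hrpv : PySem.Raise.InRange n pv.1 := hr pv (by simp)
    have hset : pvWStep cl pv = cl.set (pvSlot n pv.1) pv.2 := by
      simp [pvWStep]; rw [← hn] at hrpv ⊢; exact pySetD_slot hrpv pv.2
    have hlen : (pvWStep cl pv).length = n := by rw [hset, List.length_set, hn]
    have ih' := ih (pvWStep cl pv) hlen
      (fun q hq => hr q (List.mem_cons_of_mem _ hq))
      (fun q hq r hrm => hc q (List.mem_cons_of_mem _ hq) r (List.mem_cons_of_mem _ hrm))
    rw [List.foldl_cons, ih']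
    by_cases hj : pvSlot n pv.1 = j
    · -- head writes cell j
      have hfind : List.find? (fun pv => pvSlot n pv.1 == j) (pv :: ws) = some pv := by
        simp [hj]
      rw [hfind]
      cases hws : ws.find? (fun pv => pvSlot n pv.1 == j) with
      | some qw =>
        have hq : pvSlot n qw.1 = j := by simpa using List.find?_some hws
        have : pv.2 = qw.2 :=
          hc pv (by simp) qw (List.mem_cons_of_mem _ (List.mem_of_find?_eq_some hws))
            (by rw [hj, hq])
        simp [this]
      | none =>
        have hjlt : pvSlot n pv.1 < cl.length := by rw [hn]; exact pvSlot_lt hrpv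
        rw [hset, List.getElem?_set]
        simp [hj, hj ▸ hjlt]
    · have hfind : List.find? (fun pv => pvSlot n pv.1 == j) (pv :: ws) =
          ws.find? (fun pv => pvSlot n pv.1 == j) := by
        simp [hj]
      rw [hfind]
      cases hws : ws.find? (fun pv => pvSlot n pv.1 == j) with
      | some qw => simp
      | none => rw [hset, List.getElem?_set]; simp [hj]

-- A's first loop: the pair fold splits into the counter value and a plain write fold
lemma pvOLoop (c : List Int) (m : Int) (cl : List String) :
    (c.foldl (fun st position => (st.1 - 1, PySem.List.pySetD st.2 position "O")) (m, cl)) =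
      (m - c.length, c.foldl (fun cl p => PySem.List.pySetD cl p "O") cl) := by
  induction c generalizing m cl with
  | nil => simp
  | cons p c ih => simp [ih]; ring

-- A's second loop: while the counter covers the remaining unmatched positions, the cap is dead
lemma pvCapDrop (c : PySem.Set Int) (l : List Int) (m : Int) (cl : List String)
    (h : (l.countP (fun p => !PySem.Set.contains c p) : Int) ≤ m) :
    (l.foldl
      (fun st position =>
        if ¬ (PySem.Set.contains c position) = true ∧ st.1 > 0 then
          (st.1 - 1, PySem.List.pySetD st.2 position "_")
        else st)
      (m, cl)).2 =
    (l.filter (fun p => !PySem.Set.contains c p)).foldl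
      (fun cl p => PySem.List.pySetD cl p "_") cl := by
  induction l generalizing m cl with
  | nil => rfl
  | cons p l ih =>
    rw [List.countP_cons] at h
    by_cases hp : PySem.Set.contains c p = true
    · have hb : (!PySem.Set.contains c p) = false := by rw [hp]; rfl
      rw [hb, if_neg Bool.false_ne_true, Nat.add_zero] at h
      rw [List.foldl_cons, if_neg (fun hcond => hcond.1 hp), List.filter_cons, hb,
        if_neg Bool.false_ne_true]
      exact ih m cl h
    · have hb : (!PySem.Set.contains c p) = true := by
        cases hcp : PySem.Set.contains c p
        · rfl
        · exact absurd hcp hp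
      rw [hb, if_pos rfl] at h
      have hm : (0 : Int) < m := by
        have h0 : (0 : Int) ≤ ((l.countP fun p => !PySem.Set.contains c p : Nat) : Int) :=
          Int.natCast_nonneg _
        push_cast at h
        omega
      have hcnt : ((l.countP fun p => !PySem.Set.contains c p : Nat) : Int) ≤ m - 1 := by
        push_cast at h
        omega
      rw [List.foldl_cons, if_pos ⟨hp, hm⟩, List.filter_cons, if_pos hb, List.foldl_cons]
      exact ih (m - 1) _ hcnt

-- each distinct matched position occurs in the guess, so the counter budget suffices
lemma pvBudget (guess answer : List Int) :
    ((guess.countP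
        (fun p => !PySem.Set.contains
          (PySem.Set.inter (PySem.Set.ofList guess) (PySem.Set.ofList answer)) p)) : Int) ≤
      (guess.length : Int) -
        ((PySem.Set.inter (PySem.Set.ofList guess) (PySem.Set.ofList answer)).length : Int) := by
  set c := PySem.Set.inter (PySem.Set.ofList guess) (PySem.Set.ofList answer) with hc
  have hsub : c ⊆ guess.filter (fun p => PySem.Set.contains c p) := by
    intro x hx
    have hxg : x ∈ guess := by
      have := (PySem.Set.mem_inter (PySem.Set.ofList guess) (PySem.Set.ofList answer) x).1 hx
      exact (PySem.Set.mem_ofList _ _).1 this.1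
    refine List.mem_filter.2 ⟨hxg, ?_⟩
    simpa [PySem.Set.contains] using hx
  have hnodup : c.Nodup :=
    PySem.Set.nodup_inter _ _ (PySem.Set.nodup_ofList guess)
  have hle : c.length ≤ guess.countP (fun p => PySem.Set.contains c p) := by
    rw [List.countP_eq_length_filter]
    exact (hnodup.subperm hsub).length_le
  have hsplit := List.length_eq_countP_add_countP (fun p => PySem.Set.contains c p)
    (l := guess)
  have hnot : guess.countP (fun p => !PySem.Set.contains c p) =
      guess.countP (fun a => decide ¬(PySem.Set.contains c a) = true) := by
    apply List.countP_congr; intro x _; simp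
  rw [hnot]
  omega

-- under Pre_, every (index, mark) pair either side writes carries an in-range index,
-- and marks agree on aliased slots; the core comparison is then on find? over the two write lists.
theorem case_letter_occurs_less_in_guess_than_answer_eq
    (clue_list : List String) (guess answer : List Int)
    (hpre : Pre_case_letter_occurs_less_in_guess_than_answer_py clue_list guess answer) :
    case_letter_occurs_less_in_guess_than_answer_py clue_list guess answer =
      case_letter_occurs_less_in_guess_than_answer_py_alt clue_list guess answer := by
  obtain ⟨hr, hal⟩ := hpre
  set n := clue_list.length with hn
  set c := PySem.Set.inter (PySem.Set.ofList guess) (PySem.Set.ofList answer) with hcdef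
  have hmemc : ∀ x ∈ c, x ∈ guess ∧ x ∈ answer := by
    intro x hx
    have := (PySem.Set.mem_inter (PySem.Set.ofList guess) (PySem.Set.ofList answer) x).1 hx
    exact ⟨(PySem.Set.mem_ofList _ _).1 this.1, (PySem.Set.mem_ofList _ _).1 this.2⟩
  have hmemc' : ∀ x, x ∈ guess → x ∈ answer → x ∈ c := by
    intro x h1 h2
    exact (PySem.Set.mem_inter _ _ x).2 ⟨(PySem.Set.mem_ofList _ _).2 h1,
      (PySem.Set.mem_ofList _ _).2 h2⟩
  -- the two write lists
  set wsA : List (Int × String) :=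
    c.map (fun p => (p, "O")) ++
      (guess.filter (fun p => !PySem.Set.contains c p)).map (fun p => (p, "_")) with hwsA
  set mark : Int → String :=
    fun p => if PySem.Set.contains (PySem.Set.ofList answer) p then "O" else "_" with hmark
  set wsB : List (Int × String) := guess.map (fun p => (p, mark p)) with hwsB
  -- index side conditions
  have hidxA : ∀ pv ∈ wsA, PySem.Raise.InRange n pv.1 := by
    intro pv hpv
    rcases List.mem_append.1 hpv with h | h
    · obtain ⟨p, hp, rfl⟩ := List.mem_map.1 h
      exact hr p (hmemc p hp).1
    · obtain ⟨p, hp, rfl⟩ := List.mem_map.1 h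
      exact hr p (List.mem_filter.1 hp).1
  have hidxB : ∀ pv ∈ wsB, PySem.Raise.InRange n pv.1 := by
    intro pv hpv
    obtain ⟨p, hp, rfl⟩ := List.mem_map.1 hpv
    exact hr p hp
  -- mark of every pair in either write list is determined by answer-membership of its index
  have hmarkA : ∀ pv ∈ wsA, pv.1 ∈ guess ∧ pv.2 = mark pv.1 := by
    intro pv hpv
    rcases List.mem_append.1 hpv with h | h
    · obtain ⟨p, hp, rfl⟩ := List.mem_map.1 h
      refine ⟨(hmemc p hp).1, ?_⟩
      simp only [hmark]
      rw [if_pos]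
      simpa [PySem.Set.contains] using (PySem.Set.mem_ofList answer p).2 (hmemc p hp).2
    · obtain ⟨p, hp, rfl⟩ := List.mem_map.1 h
      obtain ⟨hpg, hpc⟩ := List.mem_filter.1 hp
      refine ⟨hpg, ?_⟩
      simp only [hmark]
      rw [if_neg]
      intro hmem
      have : p ∈ c := hmemc' p hpg ((PySem.Set.mem_ofList answer p).1 (by
        simpa [PySem.Set.contains] using hmem))
      simp [PySem.Set.contains, this] at hpc
  have hmarkB : ∀ pv ∈ wsB, pv.1 ∈ guess ∧ pv.2 = mark pv.1 := by
    intro pv hpv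
    obtain ⟨p, hp, rfl⟩ := List.mem_map.1 hpv
    exact ⟨hp, rfl⟩
  -- aliased slots carry equal marks
  have hmark_slot : ∀ p ∈ guess, ∀ q ∈ guess, pvSlot n p = pvSlot n q → mark p = mark q := by
    intro p hp q hq hs
    have := hal p hp q hq hs
    simp only [hmark]
    by_cases hpa : p ∈ answer
    · have hqa : q ∈ answer := this.1 hpa
      rw [if_pos, if_pos]
      · simpa [PySem.Set.contains] using (PySem.Set.mem_ofList answer q).2 hqa
      · simpa [PySem.Set.contains] using (PySem.Set.mem_ofList answer p).2 hpa
    · have hqa : q ∉ answer := fun h => hpa (this.2 h)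
      rw [if_neg, if_neg]
      · intro h; exact hqa ((PySem.Set.mem_ofList answer q).1 (by simpa [PySem.Set.contains] using h))
      · intro h; exact hpa ((PySem.Set.mem_ofList answer p).1 (by simpa [PySem.Set.contains] using h))
  have hconsist : ∀ (ws : List (Int × String)),
      (∀ pv ∈ ws, pv.1 ∈ guess ∧ pv.2 = mark pv.1) →
      ∀ pv ∈ ws, ∀ qw ∈ ws, pvSlot n pv.1 = pvSlot n qw.1 → pv.2 = qw.2 := by
    intro ws hws pv hpv qw hqw hs
    obtain ⟨h1, h2⟩ := hws pv hpv
    obtain ⟨h3, h4⟩ := hws qw hqw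
    rw [h2, h4]; exact hmark_slot _ h1 _ h3 hs
  -- A's program is the write fold over wsA
  have hA : case_letter_occurs_less_in_guess_than_answer_py clue_list guess answer =
      wsA.foldl pvWStep clue_list := by
    unfold case_letter_occurs_less_in_guess_than_answer_py
    simp only [← hcdef]
    have hfirst :
        (if c ≠ [] then
          c.foldl (fun st position => (st.1 - 1, PySem.List.pySetD st.2 position "O"))
            ((guess.length : Int), clue_list)
        else ((guess.length : Int), clue_list)) =
          ((guess.length : Int) - c.length,
            c.foldl (fun cl p => PySem.List.pySetD cl p "O") clue_list) := by
      split
      · exact pvOLoop c _ clue_list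
      · rename_i hnil
        simp at hnil
        rw [hnil]
        simp
    rw [hfirst, pvCapDrop c guess _ _ (by exact_mod_cast pvBudget guess answer)]
    rw [hwsA, List.foldl_append, List.foldl_map, List.foldl_map]
    rfl
  -- B's program is the write fold over wsB
  have hB : case_letter_occurs_less_in_guess_than_answer_py_alt clue_list guess answer =
      wsB.foldl pvWStep clue_list := by
    unfold case_letter_occurs_less_in_guess_than_answer_py_alt
    rw [hwsB, List.foldl_map]
    rfl
  rw [hA, hB]
  apply List.ext_getElem?
  intro j
  rw [pvWFold_getElem? wsA clue_list n j hn.symm hidxA (hconsist wsA hmarkA),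
    pvWFold_getElem? wsB clue_list n j hn.symm hidxB (hconsist wsB hmarkB)]
  -- compare the first writes to cell j on either side
  rw [hwsB, List.find?_map]
  have hcomp : ((fun pv : Int × String => pvSlot n pv.1 == j) ∘ fun p => (p, mark p)) =
      fun p => pvSlot n p == j := rfl
  rw [hcomp]
  cases hg : guess.find? (fun p => pvSlot n p == j) with
  | none =>
    have hnone : ∀ p ∈ guess, pvSlot n p ≠ j := by
      intro p hp
      have := List.find?_eq_none.1 hg p hp
      simpa using this
    have hAnone : wsA.find? (fun pv => pvSlot n pv.1 == j) = none := by
      apply List.find?_eq_none.2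
      intro pv hpv
      simpa using hnone pv.1 (hmarkA pv hpv).1
    rw [hAnone]; simp
  | some p0 =>
    have hp0g : p0 ∈ guess := List.mem_of_find?_eq_some hg
    have hp0j : pvSlot n p0 = j := by simpa using List.find?_some hg
    simp only [Option.map_some]
    -- A's side: the first write to cell j carries the same mark
    have hAex : ∃ pv ∈ wsA, (fun pv : Int × String => pvSlot n pv.1 == j) pv = true := by
      by_cases hc0 : p0 ∈ c
      · exact ⟨(p0, "O"), List.mem_append.2 (Or.inl (List.mem_map.2 ⟨p0, hc0, rfl⟩)),
          by simpa using hp0j⟩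
      · refine ⟨(p0, "_"), List.mem_append.2 (Or.inr (List.mem_map.2 ⟨p0, ?_, rfl⟩)),
          by simpa using hp0j⟩
        exact List.mem_filter.2 ⟨hp0g, by simpa [PySem.Set.contains] using hc0⟩
    cases hfa : wsA.find? (fun pv => pvSlot n pv.1 == j) with
    | none =>
      obtain ⟨pv, hpv, hpvj⟩ := hAex
      exact absurd hpvj (by simpa using List.find?_eq_none.1 hfa pv hpv)
    | some qw =>
      have hqwj : pvSlot n qw.1 = j := by simpa using List.find?_some hfa
      obtain ⟨hqg, hqm⟩ := hmarkA qw (List.mem_of_find?_eq_some hfa)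
      have : qw.2 = mark p0 := by
        rw [hqm]; exact hmark_slot _ hqg _ hp0g (by rw [hqwj, hp0j])
      simp [this]

-- ===== VERDICT (by name: the statement is the Claim_ definition above) =====
theorem case_letter_occurs_less_in_guess_than_answer_py_spec : Claim_equal_case_letter_occurs_less_in_guess_than_answer_py := by
  intro clue_list guess answer _ hpre
  unfold Spec_case_letter_occurs_less_in_guess_than_answer_py
  exact case_letter_occurs_less_in_guess_than_answer_eq clue_list guess answer hpre
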